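-- pv_equiv track=rewrite | github.com/OpenMDAO/OpenMDAO | openmdao/core/tests/test_check_partials.py | get_tables
-- ===== SOURCE A (Python) =====
-- def get_tables(content):
--     tables = []
--     lines = content.splitlines()
--     tlines = []
--     skipto = 0
--     for i, line in enumerate(lines):
--         if i < skipto:
--             continue
--         if line.startswith('+-'):
--             # start of a table
--             for j in range(i, len(lines)):
--                 if not lines[j].startswith('+') and not lines[j].startswith('|'):
--                     break
--                 tlines.append(lines[j])
--             skipto = j + 1
--             tables.append(tlines)
--             tlines = []
--     return tables
-- ===== SOURCE B (Python) =====
-- def get_tables(content):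
--     tables = []
--     current = None
--     for line in content.splitlines():
--         if current is not None:
--             if line.startswith('+') or line.startswith('|'):
--                 current.append(line)
--                 continue
--             tables.append(current)
--             current = None
--         if line.startswith('+-'):
--             current = [line]
--     if current is not None:
--         tables.append(current)
--     return tables
-- ===== Notes on version B (the rewrite author's own statement) =====
-- stated objective: simpler
-- what changed: Replaced the nested inner scan with skipto index bookkeeping by a single flat pass over the lines keeping an optional current-table accumulator that is flushed when a non-table line (or the end) is reached.
import Mathlib
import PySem

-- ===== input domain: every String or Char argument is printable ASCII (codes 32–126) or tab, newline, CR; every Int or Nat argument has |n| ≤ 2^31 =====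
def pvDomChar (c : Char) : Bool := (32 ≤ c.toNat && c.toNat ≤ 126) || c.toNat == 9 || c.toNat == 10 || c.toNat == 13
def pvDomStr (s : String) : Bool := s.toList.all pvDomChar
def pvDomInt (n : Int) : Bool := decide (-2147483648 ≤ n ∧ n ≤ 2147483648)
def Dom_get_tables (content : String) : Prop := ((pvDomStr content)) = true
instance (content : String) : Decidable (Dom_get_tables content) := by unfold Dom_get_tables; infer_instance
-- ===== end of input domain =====

-- B replaces A's skipto bookkeeping and nested inner scan by one flat pass with an
-- optional current-table accumulator (objective: simpler; same O(n) cost).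

-- ===== PORT A =====
-- inner loop 'for j in range(i, len(lines))': returns (tlines so far, Python's final j)
def getTablesInnerA (lines : List String) (j : Nat) (acc : List String) : List String × Nat :=
  if h : j < lines.length then
    if (PySem.Str.startswith lines[j] "+" || PySem.Str.startswith lines[j] "|") = false then
      (acc, j)  -- break
    else
      getTablesInnerA lines (j + 1) (acc ++ [lines[j]])
  else
    (acc, lines.length - 1)  -- range exhausted: j keeps its last value
termination_by lines.length - j

def getTablesOuterA (lines : List String) (i skipto : Nat) (tables : List (List String)) :
    List (List String) :=
  if h : i < lines.length then
    if i < skipto then getTablesOuterA lines (i + 1) skipto tables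
    else if PySem.Str.startswith lines[i] "+-" then
      getTablesOuterA lines (i + 1) ((getTablesInnerA lines i []).2 + 1)
        (tables ++ [(getTablesInnerA lines i []).1])
    else getTablesOuterA lines (i + 1) skipto tables
  else tables
termination_by lines.length - i

def get_tables (content : String) : List (List String) :=
  getTablesOuterA (PySem.Str.splitlines content) 0 0 []

-- ===== PORT B =====
def getTablesStepB (st : List (List String) × Option (List String)) (line : String) :
    List (List String) × Option (List String) :=
  match st with
  | (tables, some cur) =>
    if PySem.Str.startswith line "+" || PySem.Str.startswith line "|" then
      (tables, some (cur ++ [line]))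
    else if PySem.Str.startswith line "+-" then (tables ++ [cur], some [line])
    else (tables ++ [cur], none)
  | (tables, none) =>
    if PySem.Str.startswith line "+-" then (tables, some [line]) else (tables, none)

def getTablesFinB (st : List (List String) × Option (List String)) : List (List String) :=
  match st with
  | (tables, some cur) => tables ++ [cur]
  | (tables, none) => tables

def get_tables_alt (content : String) : List (List String) :=
  getTablesFinB ((PySem.Str.splitlines content).foldl getTablesStepB ([], none))

-- ===== PRECONDITION & SPEC =====
def Spec_get_tables (content : String) (out : List (List String)) : Prop := out = get_tables_alt content
instance (content : String) (out : List (List String)) : Decidable (Spec_get_tables content out) := by unfold Spec_get_tables; infer_instance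

-- ===== CLAIM (what is proved, stated in full; the proofs are below) =====
def Claim_equal_get_tables : Prop := ∀ (content : String), Dom_get_tables content → Spec_get_tables content (get_tables content)

-- ===== LEMMAS AND PROOFS =====

lemma startswith_pm_imp (s : String) (h : PySem.Str.startswith s "+-" = true) :
    PySem.Str.startswith s "+" = true := by
  simp only [PySem.Str.startswith_eq, PySem.Chars.startswith_iff] at h ⊢
  obtain ⟨t, ht⟩ := h
  exact ⟨'-' :: t, by simpa using ht⟩

lemma outerA_stop (lines : List String) (i s : Nat) (t : List (List String))
    (h : lines.length ≤ i) : getTablesOuterA lines i s t = t := by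
  rw [getTablesOuterA, dif_neg (Nat.not_lt.mpr h)]

lemma innerA_stop (lines : List String) (j : Nat) (acc : List String)
    (h : lines.length ≤ j) : getTablesInnerA lines j acc = (acc, lines.length - 1) := by
  rw [getTablesInnerA, dif_neg (Nat.not_lt.mpr h)]

lemma inner_ge (lines : List String) :
    ∀ n j acc, lines.length ≤ j + n → j < lines.length →
      j ≤ (getTablesInnerA lines j acc).2 := by
  intro n
  induction n with
  | zero => intro j acc hn hj; omega
  | succ n ih =>
    intro j acc hn hj
    rw [getTablesInnerA, dif_pos hj]
    by_cases hc : (PySem.Str.startswith lines[j] "+" || PySem.Str.startswith lines[j] "|") = false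
    · rw [if_pos hc]
    · rw [if_neg hc]
      by_cases hj1 : j + 1 < lines.length
      · exact Nat.le_trans (by omega) (ih (j + 1) (acc ++ [lines[j]]) (by omega) hj1)
      · rw [innerA_stop lines (j + 1) (acc ++ [lines[j]]) (by omega)]
        show j ≤ lines.length - 1
        omega

lemma outer_mono (lines : List String) :
    ∀ n i skipto tables, lines.length ≤ i + n → skipto ≤ i →
      getTablesOuterA lines i skipto tables = getTablesOuterA lines i i tables := by
  intro n
  induction n with
  | zero =>
    intro i skipto tables hn hs
    rw [outerA_stop lines i skipto tables (by omega), outerA_stop lines i i tables (by omega)]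
  | succ n ih =>
    intro i skipto tables hn hs
    by_cases he : skipto = i
    · subst he; rfl
    · by_cases h : i < lines.length
      · conv_lhs => rw [getTablesOuterA]
        conv_rhs => rw [getTablesOuterA]
        rw [dif_pos h, if_neg (show ¬ i < skipto from by omega)]
        rw [dif_pos h, if_neg (show ¬ i < i from by omega)]
        by_cases hpm : PySem.Str.startswith lines[i] "+-" = true
        · rw [if_pos hpm, if_pos hpm]
        · rw [if_neg hpm, if_neg hpm]
          rw [ih (i + 1) skipto tables (by omega) (by omega),
              ih (i + 1) i tables (by omega) (by omega)]
      · rw [outerA_stop lines i skipto tables (by omega), outerA_stop lines i i tables (by omega)]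

lemma outer_skip (lines : List String) :
    ∀ n i skipto tables, skipto ≤ i + n → i ≤ skipto →
      getTablesOuterA lines i skipto tables = getTablesOuterA lines skipto skipto tables := by
  intro n
  induction n with
  | zero =>
    intro i skipto tables hn hs
    have : i = skipto := by omega
    subst this; rfl
  | succ n ih =>
    intro i skipto tables hn hs
    by_cases he : i = skipto
    · subst he; rfl
    · have hlt : i < skipto := by omega
      by_cases h : i < lines.length
      · conv_lhs => rw [getTablesOuterA]
        rw [dif_pos h, if_pos hlt]
        exact ih (i + 1) skipto tables (by omega) (by omega)
      · rw [outerA_stop lines i skipto tables (by omega),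
            outerA_stop lines skipto skipto tables (by omega)]

lemma main_base (lines : List String) (i : Nat) (hge : lines.length ≤ i) :
    (∀ tables, getTablesOuterA lines i i tables
        = getTablesFinB ((lines.drop i).foldl getTablesStepB (tables, none)))
    ∧ (∀ cur tables,
        getTablesFinB ((lines.drop i).foldl getTablesStepB (tables, some cur))
        = getTablesOuterA lines ((getTablesInnerA lines i cur).2 + 1)
            ((getTablesInnerA lines i cur).2 + 1)
            (tables ++ [(getTablesInnerA lines i cur).1])) := by
  constructor
  · intro tables
    rw [outerA_stop lines i i tables hge, List.drop_eq_nil_of_le hge, List.foldl_nil]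
    rfl
  · intro cur tables
    rw [List.drop_eq_nil_of_le hge, List.foldl_nil, innerA_stop lines i cur hge]
    show tables ++ [cur]
        = getTablesOuterA lines (lines.length - 1 + 1) (lines.length - 1 + 1) (tables ++ [cur])
    rw [outerA_stop lines (lines.length - 1 + 1) (lines.length - 1 + 1) (tables ++ [cur]) (by omega)]

lemma main_equiv (lines : List String) :
    ∀ n i, lines.length ≤ i + n →
      (∀ tables, getTablesOuterA lines i i tables
          = getTablesFinB ((lines.drop i).foldl getTablesStepB (tables, none)))
      ∧ (∀ cur tables,
          getTablesFinB ((lines.drop i).foldl getTablesStepB (tables, some cur))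
          = getTablesOuterA lines ((getTablesInnerA lines i cur).2 + 1)
              ((getTablesInnerA lines i cur).2 + 1)
              (tables ++ [(getTablesInnerA lines i cur).1])) := by
  intro n
  induction n with
  | zero => intro i hn; exact main_base lines i (by omega)
  | succ n ih =>
    intro i hn
    by_cases h : i < lines.length
    · have hdrop : lines.drop i = lines[i] :: lines.drop (i + 1) :=
        List.drop_eq_getElem_cons h
      obtain ⟨ih1, ih2⟩ := ih (i + 1) (by omega)
      constructor
      · intro tables
        conv_lhs => rw [getTablesOuterA]
        rw [dif_pos h, if_neg (show ¬ i < i from by omega)]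
        by_cases hpm : PySem.Str.startswith lines[i] "+-" = true
        · rw [if_pos hpm]
          have hplus := startswith_pm_imp _ hpm
          have hcond : ¬ ((PySem.Str.startswith lines[i] "+"
              || PySem.Str.startswith lines[i] "|") = false) := by
            rw [hplus, Bool.true_or]; decide
          have hinner : getTablesInnerA lines i []
              = getTablesInnerA lines (i + 1) [lines[i]] := by
            rw [getTablesInnerA, dif_pos h, if_neg hcond, List.nil_append]
          have hstep : getTablesStepB (tables, none) lines[i] = (tables, some [lines[i]]) := by
            simp only [getTablesStepB]; rw [if_pos hpm]
          rw [outer_skip lines ((getTablesInnerA lines i []).2 + 1) (i + 1)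
                ((getTablesInnerA lines i []).2 + 1)
                (tables ++ [(getTablesInnerA lines i []).1]) (by omega)
                (by have := inner_ge lines lines.length i [] (by omega) h; omega)]
          rw [hdrop, List.foldl_cons, hstep, ih2 [lines[i]] tables, ← hinner]
        · rw [if_neg hpm]
          rw [outer_mono lines lines.length (i + 1) i tables (by omega) (by omega), ih1 tables]
          have hstep : getTablesStepB (tables, none) lines[i] = (tables, none) := by
            simp only [getTablesStepB]; rw [if_neg hpm]
          rw [hdrop, List.foldl_cons, hstep]
      · intro cur tables
        by_cases htab : (PySem.Str.startswith lines[i] "+"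
            || PySem.Str.startswith lines[i] "|") = true
        · have hstep : getTablesStepB (tables, some cur) lines[i]
              = (tables, some (cur ++ [lines[i]])) := by
            simp only [getTablesStepB]; rw [if_pos htab]
          have hcond : ¬ ((PySem.Str.startswith lines[i] "+"
              || PySem.Str.startswith lines[i] "|") = false) := by
            rw [htab]; decide
          have hinner : getTablesInnerA lines i cur
              = getTablesInnerA lines (i + 1) (cur ++ [lines[i]]) := by
            rw [getTablesInnerA, dif_pos h, if_neg hcond]
          rw [hdrop, List.foldl_cons, hstep, ih2 (cur ++ [lines[i]]) tables, ← hinner]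
        · have htab' : (PySem.Str.startswith lines[i] "+"
              || PySem.Str.startswith lines[i] "|") = false := by
            cases hcc : (PySem.Str.startswith lines[i] "+"
                || PySem.Str.startswith lines[i] "|")
            · rfl
            · exact absurd hcc htab
          have hpm : ¬ (PySem.Str.startswith lines[i] "+-" = true) := by
            intro hc
            rw [startswith_pm_imp _ hc, Bool.true_or] at htab'
            exact Bool.noConfusion htab'
          have hstep : getTablesStepB (tables, some cur) lines[i] = (tables ++ [cur], none) := by
            simp only [getTablesStepB]; rw [if_neg htab, if_neg hpm]
          have hinner : getTablesInnerA lines i cur = (cur, i) := by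
            rw [getTablesInnerA, dif_pos h, if_pos htab']
          rw [hdrop, List.foldl_cons, hstep, hinner]
          exact (ih1 (tables ++ [cur])).symm
    · exact main_base lines i (by omega)

-- ===== VERDICT (by name: the statement is the Claim_ definition above) =====
theorem get_tables_spec : Claim_equal_get_tables := by
  intro content _
  unfold Spec_get_tables get_tables get_tables_alt
  have := (main_equiv (PySem.Str.splitlines content)
    (PySem.Str.splitlines content).length 0 (by omega)).1 []
  simpa using this
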